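-- pv_equiv track=rewrite | github.com/MicroRatq/Windows-Auto-Installer | scripts/test_roundtrip.py | normalize_indent
-- ===== SOURCE A (Python) =====
-- def normalize_indent(text: str) -> str:
--     """规范化缩进：将每行的前导制表符或2个空格统一处理
--
--     规则：
--     - 前导制表符(\t) 转换为 2 个空格
--     - 前导2个空格保持不变
--     - 混合使用制表符和空格时，统一转换为空格
--     """
--     if not text:
--         return text
--     lines = text.split('\n')
--     normalized_lines = []
--     for line in lines:
--         # 计算前导空白字符
--         leading_whitespace = 0
--         tab_count = 0
--         space_count = 0
--
--         for char in line:
--             if char == '\t':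
--                 tab_count += 1
--                 leading_whitespace += 1
--             elif char == ' ':
--                 space_count += 1
--                 leading_whitespace += 1
--             else:
--                 break
--
--         # 将前导制表符转换为2个空格，前导空格保持不变
--         equivalent_spaces = tab_count * 2 + space_count
--         # 重新构建行：使用等效的空格数
--         if leading_whitespace > 0:
--             normalized_line = ' ' * equivalent_spaces + line[leading_whitespace:]
--         else:
--             normalized_line = line
--         normalized_lines.append(normalized_line)
--     return '\n'.join(normalized_lines)
-- ===== SOURCE B (Python) =====
-- def normalize_indent(text: str) -> str:
--     result = []
--     for line in text.split('\n'):
--         stripped = line.lstrip(' \t')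
--         leading = line[:len(line) - len(stripped)]
--         result.append(leading.replace('\t', '  ') + stripped)
--     return '\n'.join(result)
-- ===== Notes on version B (the rewrite author's own statement) =====
-- stated objective: simpler
-- what changed: Replaces the per-character counting loop (leading_whitespace/tab_count/space_count with break) and the space-string reconstruction by a string-method decomposition: lstrip splits off the leading whitespace run and replace expands each leading tab to two spaces; the redundant empty-text guard is dropped.
import Mathlib
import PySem

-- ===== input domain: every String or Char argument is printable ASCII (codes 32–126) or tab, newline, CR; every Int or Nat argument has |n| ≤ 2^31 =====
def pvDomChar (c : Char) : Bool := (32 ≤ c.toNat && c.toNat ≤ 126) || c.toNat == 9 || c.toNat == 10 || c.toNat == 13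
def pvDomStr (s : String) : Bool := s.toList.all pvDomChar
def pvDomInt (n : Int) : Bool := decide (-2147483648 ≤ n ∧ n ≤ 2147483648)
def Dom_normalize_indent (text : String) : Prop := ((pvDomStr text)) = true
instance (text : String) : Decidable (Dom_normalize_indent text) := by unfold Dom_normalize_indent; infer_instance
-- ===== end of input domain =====

-- B replaces A's explicit character-counting loop and space-reconstruction by an
-- lstrip/replace string-method decomposition (objective: simpler; same values).

-- ===== PORT A =====
-- the inner 'for char in line' loop with break: returns (leading_whitespace, tab_count, space_count)
def pvCountA : List Char → Nat × Nat × Nat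
  | [] => (0, 0, 0)
  | c :: rest =>
    if c = '\t' then
      let r := pvCountA rest
      (r.1 + 1, r.2.1 + 1, r.2.2)
    else if c = ' ' then
      let r := pvCountA rest
      (r.1 + 1, r.2.1, r.2.2 + 1)
    else (0, 0, 0)

def pvNormLineA (line : List Char) : List Char :=
  let r := pvCountA line
  let equivalent_spaces := r.2.1 * 2 + r.2.2
  if r.1 > 0 then
    List.replicate equivalent_spaces ' ' ++ PySem.Chars.slice line (some (r.1 : Int)) none
  else line

def normalize_indent (text : String) : String :=
  if text = "" then text
  else String.ofList (PySem.Chars.join ['\n'] ((PySem.Chars.splitOn text.toList ['\n']).map pvNormLineA))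

-- ===== PORT B =====
-- line.lstrip(' \t') is not a PySem primitive; dropWhile (· ∈ " \t") is exact for it
def pvNormLineB (line : List Char) : List Char :=
  let stripped := line.dropWhile (fun c => [' ', '\t'].contains c)
  let leading := PySem.Chars.slice line none (some ((line.length : Int) - (stripped.length : Int)))
  PySem.Chars.replace leading ['\t'] [' ', ' '] ++ stripped

def normalize_indent_alt (text : String) : String :=
  String.ofList (PySem.Chars.join ['\n'] ((PySem.Chars.splitOn text.toList ['\n']).map pvNormLineB))

-- ===== PRECONDITION & SPEC =====
def Spec_normalize_indent (text : String) (out : String) : Prop := out = normalize_indent_alt text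
instance (text : String) (out : String) : Decidable (Spec_normalize_indent text out) := by unfold Spec_normalize_indent; infer_instance

-- ===== CLAIM (what is proved, stated in full; the proofs are below) =====
def Claim_equal_normalize_indent : Prop := ∀ (text : String), Dom_normalize_indent text → Spec_normalize_indent text (normalize_indent text)

-- ===== LEMMAS AND PROOFS =====

-- the common reference form of one normalized line
def pvLineRef (line : List Char) : List Char :=
  (line.takeWhile (fun c => [' ', '\t'].contains c)).flatMap
    (fun c => if c = '\t' then [' ', ' '] else [c]) ++
  line.dropWhile (fun c => [' ', '\t'].contains c)

theorem pvCountA_spec (cs : List Char) :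
    (pvCountA cs).1 = (cs.takeWhile (fun c => [' ', '\t'].contains c)).length ∧
    List.replicate ((pvCountA cs).2.1 * 2 + (pvCountA cs).2.2) ' ' ++ cs.drop (pvCountA cs).1
      = pvLineRef cs := by
  induction cs with
  | nil => simp [pvCountA, pvLineRef]
  | cons c rest ih =>
    by_cases ht : c = '\t'
    · subst ht
      obtain ⟨ih1, ih2⟩ := ih
      refine ⟨?_, ?_⟩
      · simp [pvCountA, List.takeWhile_cons, ih1]
      · have : (pvCountA ('\t' :: rest)) =
          ((pvCountA rest).1 + 1, (pvCountA rest).2.1 + 1, (pvCountA rest).2.2) := by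
          simp [pvCountA]
        rw [this]
        simp only [List.drop_succ_cons]
        have hrep : List.replicate (((pvCountA rest).2.1 + 1) * 2 + (pvCountA rest).2.2) ' '
            = ' ' :: ' ' :: List.replicate ((pvCountA rest).2.1 * 2 + (pvCountA rest).2.2) ' ' := by
          have : ((pvCountA rest).2.1 + 1) * 2 + (pvCountA rest).2.2
              = ((pvCountA rest).2.1 * 2 + (pvCountA rest).2.2) + 1 + 1 := by ring
          simp [this, List.replicate_succ]
        rw [hrep]
        simp only [List.cons_append, ih2]
        simp [pvLineRef, List.takeWhile_cons, List.dropWhile_cons]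
    · by_cases hs : c = ' '
      · subst hs
        obtain ⟨ih1, ih2⟩ := ih
        refine ⟨?_, ?_⟩
        · simp [pvCountA, List.takeWhile_cons, ih1]
        · have : (pvCountA (' ' :: rest)) =
            ((pvCountA rest).1 + 1, (pvCountA rest).2.1, (pvCountA rest).2.2 + 1) := by
            simp [pvCountA]
          rw [this]
          simp only [List.drop_succ_cons]
          have hrep : List.replicate ((pvCountA rest).2.1 * 2 + ((pvCountA rest).2.2 + 1)) ' '
              = ' ' :: List.replicate ((pvCountA rest).2.1 * 2 + (pvCountA rest).2.2) ' ' := by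
            have : (pvCountA rest).2.1 * 2 + ((pvCountA rest).2.2 + 1)
                = ((pvCountA rest).2.1 * 2 + (pvCountA rest).2.2) + 1 := by ring
            simp [this, List.replicate_succ]
          rw [hrep]
          simp only [List.cons_append, ih2]
          simp [pvLineRef, List.takeWhile_cons, List.dropWhile_cons]
      · have hp : ([' ', '\t'].contains c) = false := by
          simp only [List.contains_cons, List.contains_nil, Bool.or_false, Bool.or_eq_false_iff,
            beq_eq_false_iff_ne, ne_eq]
          exact ⟨hs, ht⟩
        constructor
        · simp [pvCountA, ht, hs, List.takeWhile_cons, hp]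
        · simp [pvCountA, ht, hs, pvLineRef, List.takeWhile_cons, List.dropWhile_cons, hp]

theorem pvNormLineA_eq_ref (cs : List Char) : pvNormLineA cs = pvLineRef cs := by
  obtain ⟨h1, h2⟩ := pvCountA_spec cs
  unfold pvNormLineA
  by_cases h : (pvCountA cs).1 > 0
  · simp only [h, if_true]
    rw [PySem.Chars.slice_eq_listSlice, PySem.List.slice_from_natCast]
    exact h2
  · have h0 : (pvCountA cs).1 = 0 := by omega
    simp only [h, if_false]
    have htw : (cs.takeWhile (fun c => [' ', '\t'].contains c)) = [] := by
      have := h1; rw [h0] at this; exact (List.length_eq_zero_iff).mp this.symm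
    have hdw : cs.dropWhile (fun c => [' ', '\t'].contains c) = cs := by
      cases cs with
      | nil => rfl
      | cons c t =>
        rw [List.takeWhile_cons] at htw
        by_cases hpc : ([' ', '\t'].contains c) = true
        · rw [if_pos hpc] at htw
          exact absurd htw (List.cons_ne_nil _ _)
        · simp only [List.dropWhile_cons]
          rw [if_neg hpc]
    have href : pvLineRef cs = cs := by
      unfold pvLineRef
      rw [htw, hdw]
      rfl
    rw [href]

theorem pvReplaceGo_tab (new : List Char) (l acc : List Char) (fuel : Nat)
    (h : l.length ≤ fuel) :
    PySem.Chars.replace.go ['\t'] new fuel l acc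
      = acc.reverse ++ l.flatMap (fun c => if c = '\t' then new else [c]) := by
  induction l generalizing fuel acc with
  | nil =>
    cases fuel <;> simp [PySem.Chars.replace.go]
  | cons c t ih =>
    cases fuel with
    | zero => simp at h
    | succ f =>
      have hf : t.length ≤ f := by simpa using h
      by_cases hc : c = '\t'
      · subst hc
        have hpre : (['\t'] : List Char).isPrefixOf ('\t' :: t) = true := by
          simp [List.isPrefixOf]
        simp only [PySem.Chars.replace.go, hpre, if_true]
        rw [show (List.drop ['\t'].length ('\t' :: t)) = t from rfl, ih _ _ hf]
        simp
      · have hpre : (['\t'] : List Char).isPrefixOf (c :: t) = false := by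
          simp [List.isPrefixOf]; exact fun h => hc h.symm
        simp only [PySem.Chars.replace.go, hpre, Bool.false_eq_true, if_false]
        rw [ih _ _ hf]
        simp [hc]

theorem pvNormLineB_eq_ref (cs : List Char) : pvNormLineB cs = pvLineRef cs := by
  have hsplit : cs.takeWhile (fun c => [' ', '\t'].contains c) ++ cs.dropWhile (fun c => [' ', '\t'].contains c) = cs :=
    List.takeWhile_append_dropWhile
  have hadd : (cs.takeWhile (fun c => [' ', '\t'].contains c)).length + (cs.dropWhile (fun c => [' ', '\t'].contains c)).length = cs.length := by
    rw [← List.length_append, hsplit]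
  have hlen : ((cs.length : Int) - ((cs.dropWhile (fun c => [' ', '\t'].contains c)).length : Int))
      = ((cs.takeWhile (fun c => [' ', '\t'].contains c)).length : Int) := by omega
  have htake : cs.take (cs.takeWhile (fun c => [' ', '\t'].contains c)).length = cs.takeWhile (fun c => [' ', '\t'].contains c) :=
    (List.prefix_iff_eq_take.mp (List.takeWhile_prefix _)).symm
  show PySem.Chars.replace
      (PySem.Chars.slice cs none (some ((cs.length : Int) - ((cs.dropWhile (fun c => [' ', '\t'].contains c)).length : Int))))
      ['\t'] [' ', ' '] ++ cs.dropWhile (fun c => [' ', '\t'].contains c) = pvLineRef cs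
  rw [hlen, PySem.Chars.slice_eq_listSlice, PySem.List.slice_to_natCast, htake]
  have hrepl : PySem.Chars.replace (cs.takeWhile (fun c => [' ', '\t'].contains c)) ['\t'] [' ', ' ']
      = (cs.takeWhile (fun c => [' ', '\t'].contains c)).flatMap (fun c => if c = '\t' then [' ', ' '] else [c]) := by
    unfold PySem.Chars.replace
    simp only [List.isEmpty_cons, Bool.false_eq_true, if_false]
    exact pvReplaceGo_tab [' ', ' '] _ [] _ (le_refl _)
  rw [hrepl]
  rfl

theorem pvNormLine_eq : pvNormLineA = pvNormLineB := by
  funext cs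
  rw [pvNormLineA_eq_ref, pvNormLineB_eq_ref]

-- ===== VERDICT (by name: the statement is the Claim_ definition above) =====
theorem normalize_indent_spec : Claim_equal_normalize_indent := by
  intro text _
  unfold Spec_normalize_indent normalize_indent normalize_indent_alt
  by_cases h : text = ""
  · subst h
    decide
  · rw [if_neg h, pvNormLine_eq]
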